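-- pv_equiv track=rewrite | github.com/cirosantilli/project-euler-solvers | solvers/153.py | solve
-- ===== SOURCE A (Python) =====
-- import math
--
-- def _grouped_sum_linear_times_floor(n: int) -> int:
--     """
--     Returns sum_{k=1..n} k * floor(n/k) in O(sqrt(n)) time by grouping equal quotients.
--     """
--     if n <= 0:
--         return 0
--     total = 0
--     k = 1
--     while k <= n:
--         q = n // k
--         k2 = n // q  # largest index with same quotient q
--         # sum_{t=k..k2} t = (k + k2) * (k2 - k + 1) // 2
--         total += q * (k + k2) * (k2 - k + 1) // 2
--         k = k2 + 1
--     return total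
--
-- def solve(N: int = 10**8) -> int:
--     gcd = math.gcd
--     isqrt = math.isqrt
--
--     # Part 1: real (integer) divisors contribution: sum_{d<=N} d * floor(N/d)
--     ans = _grouped_sum_linear_times_floor(N)
--
--     # Memo for F(q) = sum_{k<=q} k * floor(q/k)
--     F_cache = {}
--
--     def F(q: int) -> int:
--         if q in F_cache:
--             return F_cache[q]
--         val = _grouped_sum_linear_times_floor(q)
--         F_cache[q] = val
--         return val
--
--     # Special primitive pair (1,1): only {1+i, 1-i} => real parts sum to 2
--     ans += 2 * F(N // 2)
--
--     # Primitive pairs (a,b), 1 <= a < b, gcd(a,b)=1, a^2 + b^2 <= N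
--     # Note: if a<b then necessarily a <= sqrt(N/2) (since b >= a+1).
--     max_a = isqrt(N // 2)
--     for a in range(1, max_a + 1):
--         a2 = a * a
--         b = a + 1
--         bmax = isqrt(N - a2)
--         if b > bmax:
--             continue
--
--         b2 = b * b
--         while b <= bmax:
--             if gcd(a, b) == 1:
--                 v = a2 + b2
--                 ans += 2 * (a + b) * F(N // v)
--
--             # increment b and update b^2 cheaply:
--             b += 1
--             b2 += 2 * b - 1  # new b^2 = old b^2 + 2*b - 1
--
--     return ans
-- ===== SOURCE B (Python) =====
-- import math
--
-- def solve(N: int = 10**8) -> int: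
--     isqrt = math.isqrt
--     def F(q: int) -> int:
--         return sum(k * (q // k) for k in range(1, q + 1))
--     ans = F(N)
--     ans += 2 * F(N // 2)
--     for a in range(1, isqrt(N // 2) + 1):
--         for b in range(a + 1, isqrt(N - a * a) + 1):
--             if math.gcd(a, b) == 1:
--                 ans += 2 * (a + b) * F(N // (a * a + b * b))
--     return ans
-- ===== Notes on version B (the rewrite author's own statement) =====
-- stated objective: simpler
-- what changed: The O(sqrt n) grouped-quotient block summation and the F memo dict are dropped: the divisor sum F(q)=sum k*floor(q/k) is computed as a direct one-line naive sum (and part 1 is recognised as literally F(N)), the incremental b^2 while-loop becomes a plain range loop; B is much shorter and plainer at the cost of asymptotic speed.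
import Mathlib
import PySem

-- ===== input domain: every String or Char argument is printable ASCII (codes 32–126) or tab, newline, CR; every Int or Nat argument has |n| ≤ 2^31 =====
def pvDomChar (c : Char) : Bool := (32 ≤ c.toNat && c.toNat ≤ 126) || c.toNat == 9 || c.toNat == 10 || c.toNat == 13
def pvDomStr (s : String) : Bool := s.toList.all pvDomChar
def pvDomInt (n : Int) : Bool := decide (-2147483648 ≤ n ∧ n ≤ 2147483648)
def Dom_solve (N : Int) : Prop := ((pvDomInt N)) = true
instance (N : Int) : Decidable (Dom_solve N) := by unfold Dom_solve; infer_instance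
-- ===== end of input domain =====

-- B replaces A's grouped-quotient O(sqrt n) summation, memo dict and incremental-square
-- while loop by a direct naive divisor sum and plain range loops: shorter and plainer, not faster.

-- ===== PORT A =====

-- math.isqrt : exact for 0 ≤ n (Python raises ValueError for n < 0; Pre_ excludes that,
-- and every internal call site receives a nonnegative argument when 0 ≤ N).
def pyIsqrt (n : Int) : Int := (Nat.sqrt n.toNat : Int)

-- while k <= n: q = n//k; k2 = n//q; total += q*(k+k2)*(k2-k+1)//2; k = k2+1
-- (fuel only makes the while-loop total; n.toNat steps always suffice, proved below)
def gsumLoop (n : Int) : Nat → Int → Int → Int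
  | 0, _, total => total
  | fuel+1, k, total =>
    if k ≤ n then
      let q := PySem.Int.floordiv n k
      let k2 := PySem.Int.floordiv n q
      gsumLoop n fuel (k2 + 1) (total + PySem.Int.floordiv (q * (k + k2) * (k2 - k + 1)) 2)
    else total

def groupedSum (n : Int) : Int := if n ≤ 0 then 0 else gsumLoop n n.toNat 1 0

-- F with the F_cache memo dict
def Fmemo (cache : PySem.Dict Int Int) (q : Int) : Int × PySem.Dict Int Int :=
  match cache.get? q with
  | some v => (v, cache)
  | none => (groupedSum q, cache.insert q (groupedSum q))

-- while b <= bmax: if gcd==1: v=a2+b2; ans += 2*(a+b)*F(N//v); b += 1; b2 += 2*b-1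
def innerLoopA (N a a2 bmax : Int) : Nat → Int → Int → Int → PySem.Dict Int Int → Int × PySem.Dict Int Int
  | 0, _, _, ans, cache => (ans, cache)
  | fuel+1, b, b2, ans, cache =>
    if b ≤ bmax then
      if Int.gcd a b == 1 then
        let r := Fmemo cache (PySem.Int.floordiv N (a2 + b2))
        innerLoopA N a a2 bmax fuel (b + 1) (b2 + 2 * (b + 1) - 1) (ans + 2 * (a + b) * r.1) r.2
      else
        innerLoopA N a a2 bmax fuel (b + 1) (b2 + 2 * (b + 1) - 1) ans cache
    else (ans, cache)

-- body of 'for a in range(1, max_a + 1)'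
def bodyA (N : Int) (st : Int × PySem.Dict Int Int) (a : Int) : Int × PySem.Dict Int Int :=
  let a2 := a * a
  let b := a + 1
  let bmax := pyIsqrt (N - a2)
  if bmax < b then st
  else innerLoopA N a a2 bmax (bmax + 1 - b).toNat b (b * b) st.1 st.2

def solve (N : Int) : Int :=
  let ans := groupedSum N
  let r := Fmemo PySem.Dict.empty (PySem.Int.floordiv N 2)
  let ans := ans + 2 * r.1
  let maxA := pyIsqrt (PySem.Int.floordiv N 2)
  ((PySem.List.pyRange 1 (maxA + 1) 1).foldl (bodyA N) (ans, r.2)).1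

-- ===== PORT B =====

-- F(q) = sum(k * (q // k) for k in range(1, q + 1))
def naiveF (q : Int) : Int :=
  (PySem.List.pyRange 1 (q + 1) 1).foldl (fun s k => s + k * PySem.Int.floordiv q k) 0

def solve_alt (N : Int) : Int :=
  let ans := naiveF N + 2 * naiveF (PySem.Int.floordiv N 2)
  (PySem.List.pyRange 1 (pyIsqrt (PySem.Int.floordiv N 2) + 1) 1).foldl (fun ans a =>
    (PySem.List.pyRange (a + 1) (pyIsqrt (N - a * a) + 1) 1).foldl (fun ans b =>
      if Int.gcd a b == 1 then ans + 2 * (a + b) * naiveF (PySem.Int.floordiv N (a * a + b * b))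
      else ans) ans) ans

-- ===== PRECONDITION & SPEC =====
-- Python A raises ValueError (math.isqrt of a negative number) for every N < 0; B raises there too.
def Pre_solve (N : Int) : Prop := 0 ≤ N
instance (N : Int) : Decidable (Pre_solve N) := by unfold Pre_solve; infer_instance
def pvWitness_solve : Int := 10

def Spec_solve (N : Int) (out : Int) : Prop := out = solve_alt N
instance (N : Int) (out : Int) : Decidable (Spec_solve N out) := by unfold Spec_solve; infer_instance

-- ===== CLAIM (what is proved, stated in full; the proofs are below) =====
def Claim_equal_solve : Prop := ∀ (N : Int), Dom_solve N → Pre_solve N → Spec_solve N (solve N)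

-- ===== LEMMAS AND PROOFS =====

-- sum(...) over the generator, written as the map-sum it accumulates
theorem naiveF_eq (q : Int) :
    naiveF q = ((PySem.List.pyRange 1 (q + 1) 1).map (fun k => k * PySem.Int.floordiv q k)).sum := by
  rw [naiveF, PySem.List.foldl_add]
  ring

-- every cached value is the grouped sum of its key
def GoodC (c : PySem.Dict Int Int) : Prop := ∀ q v, c.get? q = some v → v = groupedSum q

-- Σ_{t=k}^{k+j-1} t, closed form (the arithmetic-series step of A's block formula)
theorem two_mul_sum_pyRange (j : Nat) : ∀ k : Int,
    2 * (PySem.List.pyRange k (k + j) 1).sum = (2 * k + j - 1) * j := by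
  induction j with
  | zero => intro k; simp [PySem.List.pyRange_one_eq_nil le_rfl]
  | succ j ih =>
    intro k
    have hsplit : PySem.List.pyRange k (k + (j + 1 : Nat)) 1 =
        PySem.List.pyRange k (k + j) 1 ++ [k + j] := by
      have : (k + (j + 1 : Nat) : Int) = (k + j) + 1 := by push_cast; ring
      rw [this, PySem.List.pyRange_one_succ_right (by omega)]
    rw [hsplit, List.sum_append, List.sum_singleton]
    have := ih k
    push_cast at this ⊢
    linarith [this]

-- quotient constancy on a block: for k ≤ t ≤ n / (n / k), n / t = n / k
theorem ediv_const (n k t : Int) (h1 : 1 ≤ k) (hkn : k ≤ n) (hkt : k ≤ t)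
    (ht2 : t ≤ n / (n / k)) : n / t = n / k := by
  have hk : (0:Int) < k := by omega
  have ht : (0:Int) < t := by omega
  have hq : (1:Int) ≤ n / k := (Int.le_ediv_iff_mul_le hk).2 (by omega)
  have hq0 : (0:Int) < n / k := by omega
  have hlow : n / k ≤ n / t := by
    refine (Int.le_ediv_iff_mul_le ht).2 ?_
    have := (Int.le_ediv_iff_mul_le hq0).1 ht2
    nlinarith [this]
  have hup : n / t < n / k + 1 := by
    refine (Int.ediv_lt_iff_lt_mul ht).2 ?_
    have hlt : n < (n / k + 1) * k := by
      nlinarith [Int.emod_lt_of_pos n hk, Int.mul_ediv_add_emod n k]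

    have : (n / k + 1) * k ≤ (n / k + 1) * t := by
      apply mul_le_mul_of_nonneg_left hkt (by omega)
    linarith
  omega

theorem gsumLoop_eq (n : Int) (hn : 0 < n) : ∀ (fuel : Nat) (k total : Int),
    1 ≤ k → k ≤ n + 1 → (n + 1 - k).toNat ≤ fuel →
    gsumLoop n fuel k total =
      total + ((PySem.List.pyRange k (n + 1) 1).map (fun t => t * PySem.Int.floordiv n t)).sum := by
  intro fuel
  induction fuel with
  | zero =>
    intro k total h1 h2 hf
    have hk : k = n + 1 := by omega
    subst hk
    simp [gsumLoop, PySem.List.pyRange_one_eq_nil le_rfl]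
  | succ fuel ih =>
    intro k total h1 h2 hf
    by_cases hk : k ≤ n
    · have hk0 : (0:Int) < k := by omega
      have hfd_k : PySem.Int.floordiv n k = n / k := PySem.Int.floordiv_eq_ediv_of_pos hk0
      set q := n / k with hq_def
      have hq1 : (1:Int) ≤ q := (Int.le_ediv_iff_mul_le hk0).2 (by omega)
      have hfd_q : PySem.Int.floordiv n q = n / q := PySem.Int.floordiv_eq_ediv_of_pos (by omega)
      set k2 := n / q with hk2_def
      have hkk2 : k ≤ k2 := by
        refine (Int.le_ediv_iff_mul_le (by omega)).2 ?_
        calc k * q = n / k * k := by rw [hq_def]; ring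
          _ ≤ n := Int.ediv_mul_le n (by omega)
      have hk2n : k2 ≤ n := Int.ediv_le_self q (by omega)
      -- the added term equals the sum of t * (n // t) over the block [k, k2]
      have hblock : PySem.Int.floordiv (q * (k + k2) * (k2 - k + 1)) 2 =
          ((PySem.List.pyRange k (k2 + 1) 1).map (fun t => t * PySem.Int.floordiv n t)).sum := by
        have hconst : ((PySem.List.pyRange k (k2 + 1) 1).map
            (fun t => t * PySem.Int.floordiv n t)).sum =
            ((PySem.List.pyRange k (k2 + 1) 1).map (fun t => t * q)).sum := by
          apply congrArg
          apply List.map_congr_left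
          intro t htmem
          have hmem := (PySem.List.mem_pyRange_one).1 htmem
          have ht0 : (0:Int) < t := by omega
          rw [PySem.Int.floordiv_eq_ediv_of_pos ht0,
            ediv_const n k t h1 hk hmem.1 (by rw [← hq_def]; omega)]
        rw [hconst, List.sum_map_mul_right, List.map_id']
        have hj : (k2 + 1 : Int) = k + ((k2 + 1 - k).toNat : Int) := by omega
        have hsum := two_mul_sum_pyRange (k2 + 1 - k).toNat k
        rw [← hj] at hsum
        have h2S : q * (k + k2) * (k2 - k + 1) =
            2 * ((PySem.List.pyRange k (k2 + 1) 1).sum * q) := by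
          have : ((k2 + 1 - k).toNat : Int) = k2 + 1 - k := by omega
          rw [this] at hsum
          nlinarith [hsum]
        rw [h2S, PySem.Int.floordiv_eq_ediv_of_pos (by norm_num : (0:Int) < 2),
          Int.mul_ediv_cancel_left _ (by norm_num : (2:Int) ≠ 0)]
      have hstep : gsumLoop n (fuel + 1) k total =
          gsumLoop n fuel (k2 + 1)
            (total + PySem.Int.floordiv (q * (k + k2) * (k2 - k + 1)) 2) := by
        simp only [gsumLoop, if_pos hk, hfd_k, hfd_q]
      rw [hstep, ih (k2 + 1) _ (by omega) (by omega) (by omega),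
        PySem.List.pyRange_one_append k (k2 + 1) (n + 1) (by omega) (by omega),
        List.map_append, List.sum_append, hblock]
      ring
    · have hk : k = n + 1 := by omega
      subst hk
      simp [gsumLoop, PySem.List.pyRange_one_eq_nil le_rfl]

theorem gsum_eq_naive (n : Int) : groupedSum n = naiveF n := by
  by_cases hn : n ≤ 0
  · have : PySem.List.pyRange 1 (n + 1) 1 = [] := PySem.List.pyRange_one_eq_nil (by omega)
    simp [groupedSum, naiveF_eq, hn, this]
  · have hn' : 0 < n := by omega
    have := gsumLoop_eq n hn' n.toNat 1 0 (by omega) (by omega) (by omega)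
    simp only [groupedSum, if_neg hn, naiveF_eq]
    rw [this]
    ring

theorem Fmemo_fst {c : PySem.Dict Int Int} (h : GoodC c) (q : Int) :
    (Fmemo c q).1 = naiveF q := by
  unfold Fmemo
  cases hv : c.get? q with
  | some v => simpa [gsum_eq_naive] using h q v hv
  | none => simp [gsum_eq_naive]

theorem Fmemo_snd {c : PySem.Dict Int Int} (h : GoodC c) (q : Int) :
    GoodC (Fmemo c q).2 := by
  unfold Fmemo
  cases hv : c.get? q with
  | some v => exact h
  | none =>
    intro q' v' hv'
    rw [PySem.Dict.get?_insert] at hv'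
    split at hv'
    · rename_i hqq; cases hv'; rw [hqq]
    · exact h q' v' hv'

theorem inner_eq (N a bmax : Int) :
    ∀ (fuel : Nat) (b ans : Int) (cache : PySem.Dict Int Int), GoodC cache →
      (bmax + 1 - b).toNat ≤ fuel →
      (innerLoopA N a (a * a) bmax fuel b (b * b) ans cache).1 =
        (PySem.List.pyRange b (bmax + 1) 1).foldl (fun ans b =>
          if Int.gcd a b == 1 then ans + 2 * (a + b) * naiveF (PySem.Int.floordiv N (a * a + b * b))
          else ans) ans ∧
      GoodC (innerLoopA N a (a * a) bmax fuel b (b * b) ans cache).2 := by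
  intro fuel
  induction fuel with
  | zero =>
    intro b ans cache hc hf
    rw [PySem.List.pyRange_one_eq_nil (by omega)]
    exact ⟨rfl, hc⟩
  | succ fuel ih =>
    intro b ans cache hc hf
    by_cases hb : b ≤ bmax
    · rw [PySem.List.pyRange_one_cons (by omega : b < bmax + 1), List.foldl_cons]
      have hb2 : b * b + 2 * (b + 1) - 1 = (b + 1) * (b + 1) := by ring
      by_cases hg : (Int.gcd a b == 1) = true
      · have hstep : innerLoopA N a (a * a) bmax (fuel + 1) b (b * b) ans cache =
            innerLoopA N a (a * a) bmax fuel (b + 1) ((b + 1) * (b + 1))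
              (ans + 2 * (a + b) * (Fmemo cache (PySem.Int.floordiv N (a * a + b * b))).1)
              (Fmemo cache (PySem.Int.floordiv N (a * a + b * b))).2 := by
          simp only [innerLoopA, if_pos hb, hg, if_true, hb2]
        rw [hstep]
        have hgood := Fmemo_snd hc (PySem.Int.floordiv N (a * a + b * b))
        have hfst := Fmemo_fst hc (PySem.Int.floordiv N (a * a + b * b))
        have hrec := ih (b + 1)
          (ans + 2 * (a + b) * (Fmemo cache (PySem.Int.floordiv N (a * a + b * b))).1)
          (Fmemo cache (PySem.Int.floordiv N (a * a + b * b))).2 hgood (by omega)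
        simpa [hg, ← hfst] using hrec
      · have hstep : innerLoopA N a (a * a) bmax (fuel + 1) b (b * b) ans cache =
            innerLoopA N a (a * a) bmax fuel (b + 1) ((b + 1) * (b + 1)) ans cache := by
          simp only [innerLoopA, if_pos hb, hg, Bool.false_eq_true, if_false, hb2]
        rw [hstep]
        simpa [hg] using ih (b + 1) ans cache hc (by omega)
    · have hstep : innerLoopA N a (a * a) bmax (fuel + 1) b (b * b) ans cache = (ans, cache) := by
        simp only [innerLoopA, if_neg hb]
      rw [hstep, PySem.List.pyRange_one_eq_nil (by omega)]
      exact ⟨rfl, hc⟩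

theorem outer_eq (N : Int) (l : List Int) :
    ∀ (ans : Int) (cache : PySem.Dict Int Int), GoodC cache →
      (l.foldl (bodyA N) (ans, cache)).1 =
        l.foldl (fun ans a =>
          (PySem.List.pyRange (a + 1) (pyIsqrt (N - a * a) + 1) 1).foldl (fun ans b =>
            if Int.gcd a b == 1 then ans + 2 * (a + b) * naiveF (PySem.Int.floordiv N (a * a + b * b))
            else ans) ans) ans ∧
      GoodC (l.foldl (bodyA N) (ans, cache)).2 := by
  induction l with
  | nil => intro ans cache hc; exact ⟨rfl, hc⟩
  | cons a l ih =>
    intro ans cache hc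
    rw [List.foldl_cons, List.foldl_cons]
    by_cases hcond : pyIsqrt (N - a * a) < a + 1
    · have hbody : bodyA N (ans, cache) a = (ans, cache) := by
        simp only [bodyA, if_pos hcond]
      rw [hbody, PySem.List.pyRange_one_eq_nil (by omega)]
      exact ih ans cache hc
    · have hbody : bodyA N (ans, cache) a =
          innerLoopA N a (a * a) (pyIsqrt (N - a * a))
            ((pyIsqrt (N - a * a) + 1 - (a + 1)).toNat) (a + 1) ((a + 1) * (a + 1)) ans cache := by
        simp only [bodyA, if_neg hcond]
      rw [hbody]
      obtain ⟨h1, h2⟩ := inner_eq N a (pyIsqrt (N - a * a))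
        ((pyIsqrt (N - a * a) + 1 - (a + 1)).toNat) (a + 1) ans cache hc le_rfl
      have hrec := ih (innerLoopA N a (a * a) (pyIsqrt (N - a * a))
            ((pyIsqrt (N - a * a) + 1 - (a + 1)).toNat) (a + 1) ((a + 1) * (a + 1)) ans cache).1
        (innerLoopA N a (a * a) (pyIsqrt (N - a * a))
            ((pyIsqrt (N - a * a) + 1 - (a + 1)).toNat) (a + 1) ((a + 1) * (a + 1)) ans cache).2 h2
      simp only [Prod.mk.eta] at hrec
      rw [h1] at hrec
      exact hrec

-- ===== VERDICT (by name: the statement is the Claim_ definition above) =====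
theorem solve_spec : Claim_equal_solve := by
  intro N _ _
  unfold Spec_solve solve solve_alt
  have hempty : GoodC PySem.Dict.empty := by
    intro q v hv; simp [PySem.Dict.get?_empty] at hv
  have h2 := Fmemo_fst hempty (PySem.Int.floordiv N 2)
  have h2g := Fmemo_snd hempty (PySem.Int.floordiv N 2)
  have houter := outer_eq N (PySem.List.pyRange 1 (pyIsqrt (PySem.Int.floordiv N 2) + 1) 1)
    (groupedSum N + 2 * (Fmemo PySem.Dict.empty (PySem.Int.floordiv N 2)).1)
    (Fmemo PySem.Dict.empty (PySem.Int.floordiv N 2)).2 h2g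
  rw [houter.1, h2, gsum_eq_naive]
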